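-- pv_equiv track=rewrite | github.com/ISAAC-DOE/isaac-ai-ready-record | tools/autocatalysis/run_fairchem.py | _get_primary_element
-- ===== SOURCE A (Python) =====
-- def _get_primary_element(surface: str) -> str:
--     """Extract the primary (first) element from a surface formula."""
--     # Handle cases like "Cu3Au", "CuAu", "Cu"
--     element = ""
--     for char in surface:
--         if char.isupper():
--             if element:
--                 break
--             element = char
--         elif char.islower():
--             element += char
--         else:
--             break
--     return element if element else surface[:2]
-- ===== SOURCE B (Python) =====
-- def _get_primary_element(surface: str) -> str:
--     """Extract the primary (first) element from a surface formula."""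
--     # Head check: empty or a non-letter first character falls back to surface[:2].
--     if not surface or not (surface[0].isupper() or surface[0].islower()):
--         return surface[:2]
--     # Head + maximal lowercase tail span: "Cu3Au" -> "Cu".
--     i = 1
--     while i < len(surface) and surface[i].islower():
--         i += 1
--     return surface[:i]
-- ===== Notes on version B (the rewrite author's own statement) =====
-- stated objective: idiomatic
-- what changed: Replaces the break-driven accumulating state-machine loop with a head check plus an index-span while-loop over the maximal lowercase tail, returning a slice of the input instead of a built-up string.
import Mathlib
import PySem

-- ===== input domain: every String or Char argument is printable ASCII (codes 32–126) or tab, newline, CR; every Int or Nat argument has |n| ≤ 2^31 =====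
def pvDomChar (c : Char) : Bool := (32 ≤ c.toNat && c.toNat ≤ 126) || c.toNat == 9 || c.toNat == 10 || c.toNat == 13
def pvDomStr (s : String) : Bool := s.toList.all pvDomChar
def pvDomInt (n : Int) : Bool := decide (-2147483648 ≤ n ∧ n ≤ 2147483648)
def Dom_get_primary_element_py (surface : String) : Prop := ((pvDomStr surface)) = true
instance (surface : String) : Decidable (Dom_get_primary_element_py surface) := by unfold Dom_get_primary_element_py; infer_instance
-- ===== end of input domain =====

-- B replaces A's break-driven accumulating loop with a head check plus a lowercase tail span (idiomatic).

-- ===== PORT A =====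
-- A's for-loop; `element` is the accumulated string as a char list, `break` branches return it.
def gpeLoopA : List Char → List Char → List Char
  | [], element => element
  | c :: cs, element =>
    if PySem.Chars.isupper c then
      if element ≠ [] then element else gpeLoopA cs [c]
    else if PySem.Chars.islower c then
      gpeLoopA cs (element ++ [c])
    else element

def get_primary_element_py (surface : String) : String :=
  let element := gpeLoopA surface.toList []
  if element ≠ [] then String.ofList element else PySem.Str.slice surface none (some 2)

-- ===== PORT B =====
-- B's while-loop: index of the first non-lowercase char in the tail (span length).
def gpeSpanB : List Char → Nat
  | [] => 0
  | c :: cs => if PySem.Chars.islower c then gpeSpanB cs + 1 else 0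

def get_primary_element_py_alt (surface : String) : String :=
  match surface.toList with
  | [] => PySem.Str.slice surface none (some 2)
  | c :: rest =>
    if !(PySem.Chars.isupper c || PySem.Chars.islower c) then
      PySem.Str.slice surface none (some 2)
    else
      PySem.Str.slice surface none (some (1 + (gpeSpanB rest : Int)))

-- ===== PRECONDITION & SPEC =====
def Spec_get_primary_element_py (surface : String) (out : String) : Prop := out = get_primary_element_py_alt surface
instance (surface : String) (out : String) : Decidable (Spec_get_primary_element_py surface out) := by unfold Spec_get_primary_element_py; infer_instance

-- ===== CLAIM (what is proved, stated in full; the proofs are below) =====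
def Claim_equal_get_primary_element_py : Prop := ∀ (surface : String), Dom_get_primary_element_py surface → Spec_get_primary_element_py surface (get_primary_element_py surface)

-- ===== LEMMAS AND PROOFS =====

theorem islower_of_isupper (c : Char) (h : PySem.Chars.isupper c = true) :
    PySem.Chars.islower c = false := by
  simp only [PySem.Chars.isupper, Bool.and_eq_true, decide_eq_true_eq] at h
  simp only [PySem.Chars.islower, Bool.and_eq_false_iff, decide_eq_false_iff_not]
  left
  intro hle
  exact absurd (le_trans hle h.2) (by decide)

theorem gpeLoopA_append (cs e : List Char) (he : e ≠ []) :
    gpeLoopA cs e = e ++ cs.takeWhile PySem.Chars.islower := by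
  induction cs generalizing e with
  | nil => simp [gpeLoopA]
  | cons c cs ih =>
    by_cases hu : PySem.Chars.isupper c = true
    · simp [gpeLoopA, hu, he, islower_of_isupper c hu]
    · by_cases hl : PySem.Chars.islower c = true
      · simp only [gpeLoopA, hu, hl, if_true, List.takeWhile_cons]
        rw [ih (e ++ [c]) (by simp)]
        simp
      · simp [gpeLoopA, hu, hl]

theorem gpeSpanB_eq (cs : List Char) :
    gpeSpanB cs = (cs.takeWhile PySem.Chars.islower).length := by
  induction cs with
  | nil => simp [gpeSpanB]
  | cons c cs ih =>
    by_cases hl : PySem.Chars.islower c = true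
    · simp [gpeSpanB, hl, ih]
    · simp [gpeSpanB, hl]

theorem take_length_takeWhile {α : Type} (p : α → Bool) (l : List α) :
    l.take (l.takeWhile p).length = l.takeWhile p := by
  induction l with
  | nil => simp
  | cons c cs ih =>
    by_cases hp : p c = true
    · simp [hp, ih]
    · simp [Bool.eq_false_iff.mpr hp]

theorem slice_take (s : String) (n : Nat) :
    PySem.Str.slice s none (some (n : Int)) = String.ofList (s.toList.take n) := by
  apply String.toList_injective
  simp [PySem.Str.toList_slice, PySem.List.slice_to_natCast, String.toList_ofList]

theorem get_primary_element_py_spec' (surface : String) :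
    get_primary_element_py surface = get_primary_element_py_alt surface := by
  unfold get_primary_element_py get_primary_element_py_alt
  cases h : surface.toList with
  | nil => simp [gpeLoopA]
  | cons c rest =>
    show (if gpeLoopA (c :: rest) [] ≠ [] then String.ofList (gpeLoopA (c :: rest) [])
           else PySem.Str.slice surface none (some 2)) =
        (if (!(PySem.Chars.isupper c || PySem.Chars.islower c)) = true then
           PySem.Str.slice surface none (some 2)
         else PySem.Str.slice surface none (some (1 + (gpeSpanB rest : Int))))
    by_cases hu : PySem.Chars.isupper c = true
    · have : gpeLoopA (c :: rest) [] = c :: rest.takeWhile PySem.Chars.islower := by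
        simp only [gpeLoopA, hu, if_true]
        simpa using gpeLoopA_append rest [c] (by simp)
      have hcond : (!(PySem.Chars.isupper c || PySem.Chars.islower c)) = false := by simp [hu]
      rw [show (1 + (gpeSpanB rest : Int)) = (((1 + gpeSpanB rest : Nat) : Int)) by push_cast; ring,
        slice_take, gpeSpanB_eq, h]
      simp only [this, hcond, Bool.false_eq_true, if_false, ne_eq, reduceCtorEq,
        not_false_eq_true, if_true]
      congr 1
      rw [Nat.add_comm, List.take_succ_cons, take_length_takeWhile]
    · by_cases hl : PySem.Chars.islower c = true
      · have : gpeLoopA (c :: rest) [] = c :: rest.takeWhile PySem.Chars.islower := by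
          simp only [gpeLoopA, hu, hl, if_true]
          have := gpeLoopA_append rest [c] (by simp)
          simpa using this
        have hcond : (!(PySem.Chars.isupper c || PySem.Chars.islower c)) = false := by simp [hl]
        rw [show (1 + (gpeSpanB rest : Int)) = (((1 + gpeSpanB rest : Nat) : Int)) by push_cast; ring,
          slice_take, gpeSpanB_eq, h]
        simp only [this, hcond, Bool.false_eq_true, if_false, ne_eq, reduceCtorEq,
          not_false_eq_true, if_true]
        congr 1
        rw [Nat.add_comm, List.take_succ_cons, take_length_takeWhile]
      · simp [gpeLoopA, hu, hl]

-- ===== VERDICT (by name: the statement is the Claim_ definition above) =====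
theorem get_primary_element_py_spec : Claim_equal_get_primary_element_py := by
  intro surface _
  exact get_primary_element_py_spec' surface
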